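-- pv_equiv track=rewrite | github.com/retr0devops/remnawave-admin | shared/connection_types.py | normalize_connection_types
-- ===== SOURCE A (Python) =====
-- from typing import Iterable, List, Tuple
--
-- VALID_CONNECTION_TYPES: set[str] = {
--     "mobile",
--     "mobile_isp",
--     "fixed",
--     "isp",
--     "regional_isp",
--     "residential",
--     "hosting",
--     "vpn",
--     "business",
-- }
--
-- def normalize_connection_type(value: str | None) -> str | None:
--     """Normalize a single connection type string to lowercase canonical form."""
--     if value is None:
--         return None
--     normalized = str(value).strip().lower()
--     aliases = {
--         # GeoIP providers may return these non-canonical labels.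
--         "datacenter": "hosting",
--     }
--     normalized = aliases.get(normalized, normalized)
--     return normalized or None
--
-- def normalize_connection_types(values: Iterable[str] | None) -> Tuple[List[str], List[str]]:
--     """
--     Normalize list of connection types preserving order, removing duplicates.
--
--     Returns:
--         (normalized_valid_values, invalid_values)
--     """
--     if values is None:
--         return ([], [])
--
--     normalized: list[str] = []
--     invalid: list[str] = []
--     seen: set[str] = set()
--
--     for raw in values:
--         value = normalize_connection_type(raw)
--         if not value:
--             continue
--         if value in seen:
--             continue
--         seen.add(value)
--         if value in VALID_CONNECTION_TYPES:
--             normalized.append(value)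
--         else:
--             invalid.append(value)
--
--     return (normalized, invalid)
-- ===== SOURCE B (Python) =====
-- from typing import Iterable, List, Tuple
--
-- VALID_CONNECTION_TYPES: set[str] = {
--     "mobile",
--     "mobile_isp",
--     "fixed",
--     "isp",
--     "regional_isp",
--     "residential",
--     "hosting",
--     "vpn",
--     "business",
-- }
--
-- def normalize_connection_type(value):
--     if value is None:
--         return None
--     normalized = str(value).strip().lower()
--     aliases = {"datacenter": "hosting"}
--     normalized = aliases.get(normalized, normalized)
--     return normalized or None
--
-- def normalize_connection_types(values):
--     if values is None:
--         return ([], [])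
--     normalized = [v for v in (normalize_connection_type(raw) for raw in values) if v]
--     unique = list(dict.fromkeys(normalized))
--     return ([v for v in unique if v in VALID_CONNECTION_TYPES],
--             [v for v in unique if v not in VALID_CONNECTION_TYPES])
-- ===== Notes on version B (the rewrite author's own statement) =====
-- stated objective: idiomatic
-- what changed: Replaces the single stateful loop with a seen-set and two growing accumulators by a pipeline: normalize-and-filter comprehension, dict.fromkeys ordered dedup, then two independent filter passes splitting the deduped list into valid/invalid.
import Mathlib
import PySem

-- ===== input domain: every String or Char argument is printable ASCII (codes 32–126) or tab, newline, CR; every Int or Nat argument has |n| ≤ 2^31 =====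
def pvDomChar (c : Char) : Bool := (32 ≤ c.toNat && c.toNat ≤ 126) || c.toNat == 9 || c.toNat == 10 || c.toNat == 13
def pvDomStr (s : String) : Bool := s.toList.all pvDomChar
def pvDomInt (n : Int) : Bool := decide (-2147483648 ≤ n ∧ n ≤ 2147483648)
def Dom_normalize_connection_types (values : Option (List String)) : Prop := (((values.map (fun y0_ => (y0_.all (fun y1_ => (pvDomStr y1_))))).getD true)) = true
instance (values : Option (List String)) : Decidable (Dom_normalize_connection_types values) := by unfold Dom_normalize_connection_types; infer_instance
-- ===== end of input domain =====

-- B replaces A's single stateful loop (seen-set + two accumulators) by a pipeline: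
-- normalize/filter, ordered dedup (dict.fromkeys), then two independent filter passes.


-- shared module context: VALID_CONNECTION_TYPES and normalize_connection_type
def pvValid : PySem.Set String :=
  PySem.Set.ofList ["mobile", "mobile_isp", "fixed", "isp", "regional_isp",
    "residential", "hosting", "vpn", "business"]

-- normalize_connection_type (elements are str here, so the None branch is not taken;
-- 'normalized or None' is the trailing empty-string test)
def pvNormalize (value : String) : Option String :=
  let normalized := PySem.Str.lower (PySem.Str.strip value)
  let aliases : PySem.Dict String String := PySem.Dict.insert PySem.Dict.empty "datacenter" "hosting"
  let normalized := PySem.Dict.getD aliases normalized normalized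
  if normalized = "" then none else some normalized

-- ===== PORT A =====
-- A's loop: state (normalized, invalid, seen); 'if not value: continue' is the none case
def pvLoopA : List String → List String → List String → PySem.Set String → List String × List String
  | [], n, i, _ => (n, i)
  | raw :: rest, n, i, seen =>
    match pvNormalize raw with
    | none => pvLoopA rest n i seen
    | some v =>
      if seen.contains v then pvLoopA rest n i seen
      else if pvValid.contains v then pvLoopA rest (n ++ [v]) i (seen.add v)
      else pvLoopA rest n (i ++ [v]) (seen.add v)

def normalize_connection_types (values : Option (List String)) : List String × List String :=
  match values with
  | none => ([], [])
  | some vs => pvLoopA vs [] [] PySem.Set.empty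

-- ===== PORT B =====
def normalize_connection_types_alt (values : Option (List String)) : List String × List String :=
  match values with
  | none => ([], [])
  | some vs =>
    let normalized := vs.filterMap pvNormalize
    let unique := PySem.List.dedup normalized
    (unique.filter (fun v => pvValid.contains v),
     unique.filter (fun v => !pvValid.contains v))

-- ===== PRECONDITION & SPEC =====
def Spec_normalize_connection_types (values : Option (List String)) (out : List String × List String) : Prop := out = normalize_connection_types_alt values
instance (values : Option (List String)) (out : List String × List String) : Decidable (Spec_normalize_connection_types values out) := by unfold Spec_normalize_connection_types; infer_instance

-- ===== CLAIM (what is proved, stated in full; the proofs are below) =====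
def Claim_equal_normalize_connection_types : Prop := ∀ (values : Option (List String)), Dom_normalize_connection_types values → Spec_normalize_connection_types values (normalize_connection_types values)

-- ===== LEMMAS AND PROOFS =====

-- first-occurrence dedup of xs relative to an already-seen list
def pvUniq : List String → List String → List String
  | _, [] => []
  | seen, x :: xs =>
    if seen.contains x then pvUniq seen xs else x :: pvUniq (seen ++ [x]) xs

theorem pvFoldl_add_eq_uniq (xs : List String) (seen : PySem.Set String) :
    List.foldl PySem.Set.add seen xs = seen ++ pvUniq seen xs := by
  induction xs generalizing seen with
  | nil => simp [pvUniq]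
  | cons x xs ih =>
    by_cases h : x ∈ seen
    · simp [pvUniq, PySem.Set.add, h, ih]
    · simp [pvUniq, PySem.Set.add, h, ih (seen ++ [x])]

theorem pvDedup_eq_uniq (xs : List String) :
    PySem.List.dedup xs = pvUniq [] xs := by
  simp [PySem.List.dedup, PySem.Set.ofList, pvFoldl_add_eq_uniq, PySem.Set.empty]

theorem pvLoopA_eq (xs : List String) (n i : List String) (seen : PySem.Set String) :
    pvLoopA xs n i seen =
      (n ++ (pvUniq seen (xs.filterMap pvNormalize)).filter (fun v => pvValid.contains v),
       i ++ (pvUniq seen (xs.filterMap pvNormalize)).filter (fun v => !pvValid.contains v)) := by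
  induction xs generalizing n i seen with
  | nil => simp [pvLoopA, pvUniq]
  | cons x xs ih =>
    simp only [pvLoopA, List.filterMap_cons]
    cases h : pvNormalize x with
    | none => simp [ih]
    | some v =>
      by_cases hs : v ∈ seen
      · simp [pvUniq, hs, ih]
      · by_cases hv : v ∈ pvValid
        · simp [pvUniq, hs, hv, PySem.Set.add, ih]
        · simp [pvUniq, hs, hv, PySem.Set.add, ih]

-- ===== VERDICT (by name: the statement is the Claim_ definition above) =====
theorem normalize_connection_types_spec : Claim_equal_normalize_connection_types := by
  intro values _
  unfold Spec_normalize_connection_types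
  cases values with
  | none => rfl
  | some vs =>
    simp only [normalize_connection_types, normalize_connection_types_alt,
      pvDedup_eq_uniq, pvLoopA_eq, PySem.Set.empty, List.nil_append]
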